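-- pv_equiv track=rewrite | github.com/lilgmills/DNDStatRankCalculator | trials.py | rank_stat_roll_best_top_two
-- ===== SOURCE A (Python) =====
-- def top_two_sum(stat_rolls):
--
--     maximum_sums = []
--     current_max = None
--
--     for i, stat_list in enumerate(stat_rolls):
--         sort_stat_list = stat_list[::]
--         sort_stat_list.sort()
--         s = sort_stat_list[-1]
--         t = sort_stat_list[-2]
--         current_max = s + t
--
--         maximum_sums.append(current_max)
--
--     return max(maximum_sums)
--
-- def obtain_best_max_for_two_stat_fills(stat_rolls):
--     #requirements:
--     #contains the max sum of the highest two stats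
--     #contains the lowest sum of remaining entries
--
--     lowest_remaining_sum = None
--     obtains_max = []           #list of indices and stat roll candidates that meet the max condition for top two values
--     remaining_sums = []
--     idxs = []
--
--     current_max_top_two_sum = top_two_sum(stat_rolls)
--
--     max_value = None
--     second_max_value = None
--
--     for i, rolls in enumerate(stat_rolls):
--         sorted_rolls = rolls[::]
--
--         sorted_rolls.sort()
--
--         top_roll = sorted_rolls[-1]
--         second_best = sorted_rolls[-2]
--
--         stat_list_top_sum = top_roll + second_best
--
--         if stat_list_top_sum == current_max_top_two_sum:
--             obtains_max.append([i, rolls])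
--
--             del sorted_rolls[-1]
--             del sorted_rolls[-1] # this was originally a mistake: we just need to delete the [-1] element twice; the
--                                  # second largest will be the new [-1] entry when the [-1] entry is deleted
--
--             remaining_sum = sum(sorted_rolls)
--             remaining_sums.append(remaining_sum)
--
--             idxs.append(i)
--
--             if lowest_remaining_sum is None:
--                 lowest_remaining_sum = remaining_sum
--             elif remaining_sum < lowest_remaining_sum:
--                 lowest_remaining_sum = remaining_sum
--
--     # obtains_max
--     # remaining_sums
--     # remaining_sum
--     # returns, idx, stat_roll[at_idk]
--
--     # we have to run through the "obtains_max" indices once more to determine which one has the lowest remaining sum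
--
--     for i, candidate in enumerate(obtains_max):
--         if remaining_sums[i] == lowest_remaining_sum:
--             at_idx = idxs[i]
--             return at_idx, stat_rolls[at_idx]
--
-- def rank_stat_roll_best_top_two(stat_rolls):
--     if stat_rolls == []:
--         return []
--     else:
--         idx, best = obtain_best_max_for_two_stat_fills(stat_rolls)
--
--         new_vector = stat_rolls[::]
--
--         del new_vector[idx]
--
--         return rank_stat_roll_best_top_two(new_vector) + [best]
-- ===== SOURCE B (Python) =====
-- def rank_stat_roll_best_top_two(stat_rolls):
--     keyed = []
--     for i, roll in enumerate(stat_rolls):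
--         srt = sorted(roll)
--         tt = srt[-1] + srt[-2]
--         keyed.append((tt, tt - sum(roll), -i, roll))
--     keyed.sort(key=lambda k: (k[0], k[1], k[2]))
--     return [k[3] for k in keyed]
-- ===== Notes on version B (the rewrite author's own statement) =====
-- stated objective: faster
-- what changed: A repeatedly rescans the whole list to select the best roll (max top-two sum, then min remaining sum, then lowest index) and recurses after deleting it; B computes a key (top_two, -(remaining), -index) per roll once and does a single sort, reading the ranking off directly.
import Mathlib
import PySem

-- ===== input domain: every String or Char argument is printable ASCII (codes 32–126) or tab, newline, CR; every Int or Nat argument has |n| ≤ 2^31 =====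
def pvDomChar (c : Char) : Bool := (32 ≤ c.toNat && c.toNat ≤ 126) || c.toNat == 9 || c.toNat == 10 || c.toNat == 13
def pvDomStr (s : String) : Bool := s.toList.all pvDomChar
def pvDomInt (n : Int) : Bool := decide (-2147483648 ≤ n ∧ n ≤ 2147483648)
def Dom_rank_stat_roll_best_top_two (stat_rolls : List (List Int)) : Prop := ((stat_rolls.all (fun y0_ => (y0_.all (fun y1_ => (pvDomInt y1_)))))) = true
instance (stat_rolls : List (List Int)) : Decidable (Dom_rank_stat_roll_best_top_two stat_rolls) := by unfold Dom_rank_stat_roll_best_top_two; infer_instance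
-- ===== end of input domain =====

-- B replaces A's quadratic repeated best-candidate selection and deletion with one keyed sort (objective: faster).

-- ===== PORT A =====
-- A's helper top_two_sum: builds the list of top-two sums, returns its max.
-- (pyGetD defaults 0 / max?.getD 0 are reached only where the Python raises, i.e. outside Pre_.)
def pv_top_two_sum (stat_rolls : List (List Int)) : Int :=
  let maximum_sums := stat_rolls.foldl (fun acc stat_list =>
    let sort_stat_list := PySem.List.sorted (PySem.List.slice stat_list none none) (fun x => x)
    let s := PySem.List.pyGetD sort_stat_list (-1) 0
    let t := PySem.List.pyGetD sort_stat_list (-2) 0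
    acc ++ [s + t]) []
  (PySem.List.max? maximum_sums (fun x => x)).getD 0

-- state: (lowest_remaining_sum, obtains_max, remaining_sums, idxs)
def pvObtainStep (current_max : Int)
    (st : Option Int × List (Int × List Int) × List Int × List Int)
    (p : Int × List Int) : Option Int × List (Int × List Int) × List Int × List Int :=
  let sorted_rolls := PySem.List.sorted (PySem.List.slice p.2 none none) (fun x => x)
  let top_roll := PySem.List.pyGetD sorted_rolls (-1) 0
  let second_best := PySem.List.pyGetD sorted_rolls (-2) 0
  if top_roll + second_best = current_max then
    let deleted := sorted_rolls.dropLast.dropLast   -- del sorted_rolls[-1]; del sorted_rolls[-1]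
    let remaining_sum := deleted.sum
    let lowest' := match st.1 with
      | none => some remaining_sum
      | some l => if remaining_sum < l then some remaining_sum else some l
    (lowest', st.2.1 ++ [(p.1, p.2)], st.2.2.1 ++ [remaining_sum], st.2.2.2 ++ [p.1])
  else st

-- A's final loop: first candidate whose remaining sum equals the lowest one
def pvObtainScan : List (Int × Int) → Option Int → List (List Int) → Option (Int × List Int)
  | [], _, _ => none
  | rp :: rest, lowest, stat_rolls =>
      if some rp.1 = lowest then some (rp.2, PySem.List.pyGetD stat_rolls rp.2 [])
      else pvObtainScan rest lowest stat_rolls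

def pv_obtain_best_max_for_two_stat_fills (stat_rolls : List (List Int)) :
    Option (Int × List Int) :=
  let current_max := pv_top_two_sum stat_rolls
  let st := (PySem.List.enumerate stat_rolls).foldl (pvObtainStep current_max) (none, [], [], [])
  pvObtainScan (st.2.2.1.zip st.2.2.2) st.1 stat_rolls

-- A's recursion, with fuel = length (each step deletes one element)
def pvRankAux : Nat → List (List Int) → List (List Int)
  | _, [] => []
  | 0, _ => []          -- fuel exhausted: unreachable, fuel starts at length
  | fuel+1, sr =>
    match pv_obtain_best_max_for_two_stat_fills sr with
    | none => []        -- Python would raise unpacking None; outside Pre_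
    | some (idx, best) =>
      match PySem.List.pop? (PySem.List.slice sr none none) idx with   -- new_vector = sr[::]; del new_vector[idx]
      | none => []
      | some (_, new_vector) => pvRankAux fuel new_vector ++ [best]

def rank_stat_roll_best_top_two (stat_rolls : List (List Int)) : List (List Int) :=
  pvRankAux stat_rolls.length stat_rolls

-- ===== PORT B =====
-- key of one roll: (top-two sum, -(remaining sum), -index, roll)
def pvBKey (i : Int) (roll : List Int) : Int × Int × Int × List Int :=
  let srt := PySem.List.sorted roll (fun x => x)
  let tt := PySem.List.pyGetD srt (-1) 0 + PySem.List.pyGetD srt (-2) 0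
  (tt, tt - roll.sum, -i, roll)

def rank_stat_roll_best_top_two_alt (stat_rolls : List (List Int)) : List (List Int) :=
  let keyed := (PySem.List.enumerate stat_rolls).foldl (fun acc p => acc ++ [pvBKey p.1 p.2]) []
  (PySem.List.sorted keyed (fun k => toLex (k.1, toLex (k.2.1, k.2.2.1)))).map (fun k => k.2.2.2)

-- ===== PRECONDITION & SPEC =====
-- Pre_ excludes exactly the inputs where Python A raises IndexError: a sublist with fewer than two entries.
def Pre_rank_stat_roll_best_top_two (stat_rolls : List (List Int)) : Prop :=
  ∀ r ∈ stat_rolls, 2 ≤ r.length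
instance (stat_rolls : List (List Int)) : Decidable (Pre_rank_stat_roll_best_top_two stat_rolls) := by unfold Pre_rank_stat_roll_best_top_two; infer_instance
def pvWitness_rank_stat_roll_best_top_two : List (List Int) := [[1, 2, 3], [4, 5], [2, 6, 1]]
def Spec_rank_stat_roll_best_top_two (stat_rolls : List (List Int)) (out : List (List Int)) : Prop := out = rank_stat_roll_best_top_two_alt stat_rolls
instance (stat_rolls : List (List Int)) (out : List (List Int)) : Decidable (Spec_rank_stat_roll_best_top_two stat_rolls out) := by unfold Spec_rank_stat_roll_best_top_two; infer_instance

-- ===== CLAIM (what is proved, stated in full; the proofs are below) =====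
def Claim_equal_rank_stat_roll_best_top_two : Prop := ∀ (stat_rolls : List (List Int)), Dom_rank_stat_roll_best_top_two stat_rolls → Pre_rank_stat_roll_best_top_two stat_rolls → Spec_rank_stat_roll_best_top_two stat_rolls (rank_stat_roll_best_top_two stat_rolls)

-- ===== LEMMAS AND PROOFS =====

-- spec-side abbreviations
def pvTT (r : List Int) : Int :=
  PySem.List.pyGetD (PySem.List.sorted r (fun x => x)) (-1) 0 +
  PySem.List.pyGetD (PySem.List.sorted r (fun x => x)) (-2) 0
def pvRem (r : List Int) : Int :=
  ((PySem.List.sorted r (fun x => x)).dropLast.dropLast).sum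
def pvKeyEnt (p : Int × List Int) : Int × Int × Int × List Int := pvBKey p.1 p.2
def pvKfun (k : Int × Int × Int × List Int) : Lex (Int × Lex (Int × Int)) :=
  toLex (k.1, toLex (k.2.1, k.2.2.1))
def pvKeyed (sr : List (List Int)) : List (Int × Int × Int × List Int) :=
  (PySem.List.enumerate sr).map pvKeyEnt
def pvLowRun (o : Option Int) (rs : List Int) : Option Int :=
  rs.foldl (fun o r => match o with
    | none => some r
    | some l => if r < l then some r else some l) o

-- remaining sum = sum − top-two sum, for every list (defaults included)
lemma pvTwoSplit (l : List Int) : l = [] ∨ (∃ a, l = [a]) ∨ ∃ l' a b, l = l' ++ [a, b] := by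
  induction l with
  | nil => exact Or.inl rfl
  | cons x xs ih =>
    rcases ih with h | ⟨a, h⟩ | ⟨l', a, b, h⟩
    · exact Or.inr (Or.inl ⟨x, by rw [h]⟩)
    · exact Or.inr (Or.inr ⟨[], x, a, by rw [h]; rfl⟩)
    · exact Or.inr (Or.inr ⟨x :: l', a, b, by rw [h]; rfl⟩)

lemma pvAux (t : List Int) :
    (t.dropLast.dropLast).sum = t.sum - PySem.List.pyGetD t (-1) 0 - PySem.List.pyGetD t (-2) 0 := by
  rcases pvTwoSplit t with rfl | ⟨a, rfl⟩ | ⟨l', a, b, rfl⟩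
  · decide
  · simp [PySem.List.pyGetD, PySem.List.pyGet?, PySem.List.pyIdx?]
  · have h1 : PySem.List.pyGetD (l' ++ [a, b]) (-1) 0 = b := by
      have : l' ++ [a, b] = (l' ++ [a]) ++ [b] := by simp
      rw [this, PySem.List.pyGetD_neg_one_append_singleton]
    have h2 : PySem.List.pyGetD (l' ++ [a, b]) (-2) 0 = a := by
      rw [PySem.List.pyGetD_neg_ofNat (l' ++ [a, b]) 2 0 (by omega) (by simp)]
      simp
    rw [h1, h2]
    have hd : (l' ++ [a, b]).dropLast.dropLast = l' := by
      rw [show l' ++ [a, b] = (l' ++ [a]) ++ [b] by simp, List.dropLast_concat, List.dropLast_concat]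
    rw [hd]; simp; ring

lemma pvRem_eq (r : List Int) : pvRem r = r.sum - pvTT r := by
  have hperm : (PySem.List.sorted r (fun x => x)).Perm r := PySem.List.sorted_perm r (fun x => x) false
  have := pvAux (PySem.List.sorted r (fun x => x))
  unfold pvRem pvTT
  rw [this, hperm.sum_eq]; ring

-- the first loop of obtain_best, characterised
lemma pvFold_spec (M : Int) (l : List (Int × List Int))
    (low : Option Int) (ob : List (Int × List Int)) (rems ixs : List Int) :
    l.foldl (pvObtainStep M) (low, ob, rems, ixs) =
      (pvLowRun low ((l.filter (fun p => pvTT p.2 = M)).map (fun p => pvRem p.2)),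
       ob ++ l.filter (fun p => pvTT p.2 = M),
       rems ++ (l.filter (fun p => pvTT p.2 = M)).map (fun p => pvRem p.2),
       ixs ++ (l.filter (fun p => pvTT p.2 = M)).map (·.1)) := by
  induction l generalizing low ob rems ixs with
  | nil => simp [pvLowRun]
  | cons p l ih =>
    by_cases h : pvTT p.2 = M
    · have h' : PySem.List.pyGetD (PySem.List.sorted p.2 fun x => x) (-1) 0 +
          PySem.List.pyGetD (PySem.List.sorted p.2 fun x => x) (-2) 0 = M := by
        simpa [pvTT] using h
      simp only [List.foldl_cons, pvObtainStep, PySem.List.slice_none_none, List.filter_cons,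
        h, decide_true]
      rw [if_pos h', ih]
      simp [pvLowRun, pvRem]
    · have h' : ¬ (PySem.List.pyGetD (PySem.List.sorted p.2 fun x => x) (-1) 0 +
          PySem.List.pyGetD (PySem.List.sorted p.2 fun x => x) (-2) 0 = M) := by
        simpa [pvTT] using h
      simp only [List.foldl_cons, pvObtainStep, PySem.List.slice_none_none, List.filter_cons,
        h, decide_false]
      rw [if_neg h', ih]
      simp

lemma pvLowRun_some (rs : List Int) (a : Int) :
    pvLowRun (some a) rs = some (rs.foldl min a) := by
  induction rs generalizing a with
  | nil => rfl
  | cons r rs ih =>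
    simp only [pvLowRun, List.foldl_cons] at *
    rw [show (if r < a then some r else some a) = some (min a r) by
      split_ifs with h <;> simp [min_def] <;> omega]
    exact ih (min a r)

lemma pvLowRun_none (r : Int) (rs : List Int) :
    pvLowRun none (r :: rs) = some (rs.foldl min r) := by
  simp only [pvLowRun, List.foldl_cons]
  exact pvLowRun_some rs r

-- the final scan, characterised
lemma pvScan_spec (F : List (Int × List Int)) (L : Int) (sr : List (List Int))
    (hex : ∃ p ∈ F, pvRem p.2 = L) :
    ∃ F1 p F2, F = F1 ++ p :: F2 ∧ (∀ q ∈ F1, pvRem q.2 ≠ L) ∧ pvRem p.2 = L ∧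
      pvObtainScan (F.map (fun q => (pvRem q.2, q.1))) (some L) sr =
        some (p.1, PySem.List.pyGetD sr p.1 []) := by
  induction F with
  | nil => simp at hex
  | cons p F ih =>
    by_cases h : pvRem p.2 = L
    · exact ⟨[], p, F, rfl, by simp, h, by simp [pvObtainScan, h]⟩
    · have hex' : ∃ q ∈ F, pvRem q.2 = L := by
        rcases hex with ⟨q, hq, hql⟩
        rcases List.mem_cons.mp hq with rfl | hq'
        · exact absurd hql h
        · exact ⟨q, hq', hql⟩
      rcases ih hex' with ⟨F1, q, F2, hF, hne, hql, hscan⟩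
      exact ⟨p :: F1, q, F2, by simp [hF], by
        intro x hx; rcases List.mem_cons.mp hx with rfl | hx'
        · exact h
        · exact hne x hx', hql, by simp [pvObtainScan, h, hscan]⟩

lemma pvKfun_ent (i : Int) (r : List Int) :
    pvKfun (pvKeyEnt (i, r)) = toLex (pvTT r, toLex (- pvRem r, -i)) := by
  have h : pvRem r = r.sum - pvTT r := pvRem_eq r
  simp only [pvKfun, pvKeyEnt, pvBKey, pvTT, h]
  ring_nf

lemma pvLex_lt (t1 c1 i1 t2 c2 i2 : Int) :
    (toLex (t1, toLex (c1, i1)) < toLex (t2, toLex (c2, i2))) ↔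
      (t1 < t2 ∨ (t1 = t2 ∧ (c1 < c2 ∨ (c1 = c2 ∧ i1 < i2)))) := by
  constructor
  · intro h
    rcases Prod.Lex.lt_iff.mp h with h1 | ⟨h1, h2⟩
    · exact Or.inl h1
    · rcases Prod.Lex.lt_iff.mp h2 with h3 | ⟨h3, h4⟩
      · exact Or.inr ⟨h1, Or.inl h3⟩
      · exact Or.inr ⟨h1, Or.inr ⟨h3, h4⟩⟩
  · intro h
    rcases h with h1 | ⟨h1, h2 | ⟨h2, h3⟩⟩
    · exact Prod.Lex.lt_iff.mpr (Or.inl h1)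
    · exact Prod.Lex.lt_iff.mpr (Or.inr ⟨h1, Prod.Lex.lt_iff.mpr (Or.inl h2)⟩)
    · exact Prod.Lex.lt_iff.mpr (Or.inr ⟨h1, Prod.Lex.lt_iff.mpr (Or.inr ⟨h2, h3⟩)⟩)

lemma pvTopTwo_eq (sr : List (List Int)) :
    pv_top_two_sum sr = (PySem.List.max? (sr.map pvTT) (fun x => x)).getD 0 := by
  unfold pv_top_two_sum
  simp only [PySem.List.slice_none_none]
  simp only [PySem.List.foldl_append_singleton_eq_map (f := fun stat_list : List Int =>
      PySem.List.pyGetD (PySem.List.sorted stat_list (fun x => x)) (-1) 0 +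
      PySem.List.pyGetD (PySem.List.sorted stat_list (fun x => x)) (-2) 0),
    List.nil_append]
  rfl

-- obtain_best returns the strictly pvKfun-greatest enumerated entry
lemma pv_obtain_spec (sr : List (List Int)) (hne : sr ≠ []) :
    ∃ (k : Nat) (hk : k < sr.length),
      pv_obtain_best_max_for_two_stat_fills sr = some ((k : Int), sr[k]) ∧
      (∀ (j : Nat) (hj : j < sr.length), j ≠ k →
        pvKfun (pvKeyEnt ((j : Int), sr[j])) < pvKfun (pvKeyEnt ((k : Int), sr[k]))) := by
  have hmapne : sr.map pvTT ≠ [] := by simpa using hne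
  obtain ⟨M, hM⟩ : ∃ M, PySem.List.max? (sr.map pvTT) (fun x => x) = some M := by
    rcases h : PySem.List.max? (sr.map pvTT) (fun x => x) with _ | M
    · exact absurd ((PySem.List.max?_eq_none_iff _ _).mp h) hmapne
    · exact ⟨M, rfl⟩
  have htop : pv_top_two_sum sr = M := by rw [pvTopTwo_eq, hM]; rfl
  have hMmem : M ∈ sr.map pvTT := PySem.List.max?_mem hM
  have hMmax : ∀ y ∈ sr.map pvTT, y ≤ M := PySem.List.max?_isMax hM
  set F := (PySem.List.enumerate sr).filter (fun p => decide (pvTT p.2 = M)) with hFdef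
  have hFne : F ≠ [] := by
    rcases List.mem_map.mp hMmem with ⟨r, hr, hrM⟩
    rcases List.mem_iff_getElem.mp hr with ⟨k, hk, rfl⟩
    have hmem : ((0:Int) + k, sr[k]) ∈ PySem.List.enumerate sr :=
      (PySem.List.mem_enumerate_iff _ _ _).mpr ⟨k, hk, rfl⟩
    exact List.ne_nil_of_mem (List.mem_filter.mpr ⟨hmem, by simpa using hrM⟩)
  obtain ⟨p1, Ftl, hFcons⟩ := List.exists_cons_of_ne_nil hFne
  set L := ((Ftl.map (fun p => pvRem p.2)).foldl min (pvRem p1.2)) with hLdef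
  have hlow : pvLowRun none (F.map (fun p => pvRem p.2)) = some L := by
    rw [hFcons]; simp only [List.map_cons]; exact pvLowRun_none _ _
  have hLmem : L ∈ F.map (fun p => pvRem p.2) := by
    rw [hFcons]; simp only [List.map_cons]
    rcases PySem.List.foldl_min_mem (Ftl.map (fun p => pvRem p.2)) (pvRem p1.2) with h | h
    · rw [hLdef, h]; exact List.mem_cons_self
    · exact List.mem_cons_of_mem _ h
  have hLle : ∀ r ∈ F.map (fun p => pvRem p.2), L ≤ r := by
    intro r hr
    rw [hFcons] at hr; simp only [List.map_cons] at hr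
    rcases List.mem_cons.mp hr with rfl | hr'
    · exact (PySem.List.foldl_min_le _ _).1
    · exact (PySem.List.foldl_min_le _ _).2 r hr'
  have hex : ∃ p ∈ F, pvRem p.2 = L := by
    rcases List.mem_map.mp hLmem with ⟨p, hp, hpL⟩
    exact ⟨p, hp, hpL⟩
  rcases pvScan_spec F L sr hex with ⟨F1, p0, F2, hFsplit, hF1ne, hp0L, hscan⟩
  have hp0F : p0 ∈ F := by rw [hFsplit]; exact List.mem_append_right _ List.mem_cons_self
  have hp0E : p0 ∈ PySem.List.enumerate sr := List.mem_of_mem_filter hp0F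
  have hp0M : pvTT p0.2 = M := by
    have := (List.mem_filter.mp hp0F).2; simpa using this
  obtain ⟨k, hk, hpk⟩ := (PySem.List.mem_enumerate_iff _ _ _).mp hp0E
  have hpk' : p0 = ((k : Int), sr[k]) := by rw [hpk]; norm_num
  have hobt : pv_obtain_best_max_for_two_stat_fills sr = some ((k : Int), sr[k]) := by
    simp only [pv_obtain_best_max_for_two_stat_fills]
    rw [htop, pvFold_spec M (PySem.List.enumerate sr) none [] [] []]
    simp only [List.nil_append, List.zip_map']
    rw [← hFdef, hlow, hscan, hpk']
    have : PySem.List.pyGetD sr ((k : Int)) [] = sr[k] := by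
      rw [PySem.List.pyGetD_natCast]; exact List.getD_eq_getElem _ _ hk
    rw [this]
  refine ⟨k, hk, hobt, ?_⟩
  intro j hj hjk
  rw [hpk'] at hp0M hp0L
  simp only at hp0M hp0L
  rw [pvKfun_ent, pvKfun_ent, pvLex_lt]
  have htj : pvTT sr[j] ≤ M := hMmax _ (List.mem_map.mpr ⟨sr[j], List.getElem_mem hj, rfl⟩)
  by_cases hEq : pvTT sr[j] = M
  · -- top-two sums tie: compare remaining sums, then indices
    have hjE : ((0:Int) + j, sr[j]) ∈ PySem.List.enumerate sr :=
      (PySem.List.mem_enumerate_iff _ _ _).mpr ⟨j, hj, rfl⟩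
    have hjF : ((0:Int) + j, sr[j]) ∈ F := List.mem_filter.mpr ⟨hjE, by simpa using hEq⟩
    have hremj : L ≤ pvRem sr[j] := hLle _ (List.mem_map.mpr ⟨_, hjF, rfl⟩)
    rcases lt_or_eq_of_le hremj with hlt | hEqr
    · exact Or.inr ⟨by rw [hEq, hp0M], Or.inl (by omega)⟩
    · -- full tie on the two sums: the selected index is the smaller one
      have hjne : ((0:Int) + j, sr[j]) ≠ p0 := by
        rw [hpk']; intro hcontra
        have : (0 : Int) + j = (k : Int) := congrArg Prod.fst hcontra
        omega
      have hjF2 : ((0:Int) + j, sr[j]) ∈ F2 := by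
        rw [hFsplit] at hjF
        rcases List.mem_append.mp hjF with h1 | h2
        · exact absurd hEqr.symm (hF1ne _ h1)
        · rcases List.mem_cons.mp h2 with hcontra | h3
          · exact absurd hcontra hjne
          · exact h3
      have hpw : F.Pairwise (fun p q => p.1 < q.1) :=
        List.Pairwise.sublist List.filter_sublist (PySem.List.pairwise_lt_enumerate sr 0)
      rw [hFsplit] at hpw
      have hklt : p0.1 < (0:Int) + j :=
        (List.pairwise_cons.mp (List.pairwise_append.mp hpw).2.1).1 _ hjF2
      rw [hpk'] at hklt
      refine Or.inr ⟨by rw [hEq, hp0M], Or.inr ⟨by rw [← hEqr, hp0L], by omega⟩⟩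
  · exact Or.inl (by rw [hp0M]; exact lt_of_le_of_ne htj hEq)

-- B in map-of-sorted form
lemma pvAlt_eq (sr : List (List Int)) :
    rank_stat_roll_best_top_two_alt sr =
      (PySem.List.sorted (pvKeyed sr) pvKfun).map (fun k => k.2.2.2) := by
  unfold rank_stat_roll_best_top_two_alt pvKeyed pvKfun pvKeyEnt
  simp only [PySem.List.foldl_append_singleton_eq_map (f := fun p : Int × List Int => pvBKey p.1 p.2),
    List.nil_append]

-- enumerate shifted start
lemma pvEnumerate_shift {α : Type} (xs : List α) (s : Int) :
    PySem.List.enumerate xs (s + 1) = (PySem.List.enumerate xs s).map (fun p => (p.1 + 1, p.2)) := by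
  induction xs generalizing s with
  | nil => simp [PySem.List.enumerate_nil]
  | cons x xs ih => simp [PySem.List.enumerate_cons, ih]

-- pairwise ≤ plus pairwise ≠ gives pairwise <
lemma pvPairwise_lt {α : Type} {l : List α} (f : α → Lex (Int × Lex (Int × Int)))
    (h1 : l.Pairwise (fun a b => f a ≤ f b)) (h2 : l.Pairwise (fun a b => f a ≠ f b)) :
    l.Pairwise (fun a b => f a < f b) := by
  exact (h1.and h2).imp (fun h => lt_of_le_of_ne h.1 h.2)

lemma pvKfun_inj3 {a b : Int × Int × Int × List Int} (h : pvKfun a = pvKfun b) :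
    a.2.2.1 = b.2.2.1 := congrArg (fun z => (ofLex ((ofLex z).2)).2) h

lemma pvEnt3 (p : Int × List Int) : (pvKeyEnt p).2.2.1 = -p.1 := rfl

-- sorted over keyed entries with strictly increasing indices is strictly increasing in the key
lemma pvStrict (l : List (Int × List Int)) (hpw : l.Pairwise (fun p q => p.1 < q.1)) :
    (PySem.List.sorted (l.map pvKeyEnt) pvKfun).Pairwise (fun a b => pvKfun a < pvKfun b) := by
  apply pvPairwise_lt pvKfun (PySem.List.sorted_pairwise _ _)
  have hperm := PySem.List.sorted_perm (l.map pvKeyEnt) pvKfun false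
  rw [List.Perm.pairwise_iff (fun h => Ne.symm h) hperm, List.pairwise_map]
  refine hpw.imp ?_
  intro p q h heq
  have h3 := pvKfun_inj3 heq
  rw [pvEnt3, pvEnt3] at h3
  omega

lemma pvEraseIdx_fst_ne (sr : List (List Int)) (k : Nat) (hk : k < sr.length) :
    ∀ q ∈ (PySem.List.enumerate sr).eraseIdx k, q.1 ≠ (k : Int) := by
  have hlenE : k < (PySem.List.enumerate sr).length := by
    rw [PySem.List.length_enumerate]; exact hk
  have hEk : (PySem.List.enumerate sr)[k] = ((k : Int), sr[k]) := by
    rw [PySem.List.getElem_enumerate]; norm_num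
  have hpwE := PySem.List.pairwise_lt_enumerate sr 0
  have hsplit : PySem.List.enumerate sr =
      (PySem.List.enumerate sr).take k ++ ((k : Int), sr[k]) ::
        (PySem.List.enumerate sr).drop (k+1) := by
    conv_lhs => rw [← List.take_append_drop k (PySem.List.enumerate sr)]
    rw [List.drop_eq_getElem_cons hlenE, hEk]
  intro q hq
  rw [List.eraseIdx_eq_take_drop_succ] at hq
  rcases List.mem_append.mp hq with h1 | h2
  · have hpw' := hsplit ▸ hpwE
    have := (List.pairwise_append.mp hpw').2.2 _ h1 _ List.mem_cons_self
    simp only at this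
    omega
  · have hpw' := hsplit ▸ hpwE
    have := (List.pairwise_cons.mp (List.pairwise_append.mp hpw').2.1).1 _ h2
    simp only at this
    omega

-- the sorted keyed list of sr splits off its strictly greatest entry
lemma pvSorted_split (sr : List (List Int)) (k : Nat) (hk : k < sr.length)
    (hmax : ∀ (j : Nat) (hj : j < sr.length), j ≠ k →
      pvKfun (pvKeyEnt ((j : Int), sr[j])) < pvKfun (pvKeyEnt ((k : Int), sr[k]))) :
    PySem.List.sorted (pvKeyed sr) pvKfun =
      PySem.List.sorted (((PySem.List.enumerate sr).eraseIdx k).map pvKeyEnt) pvKfun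
        ++ [pvKeyEnt ((k : Int), sr[k])] := by
  have hlenE : k < (PySem.List.enumerate sr).length := by
    rw [PySem.List.length_enumerate]; exact hk
  have hEk : (PySem.List.enumerate sr)[k] = ((k : Int), sr[k]) := by
    rw [PySem.List.getElem_enumerate]; norm_num
  have hpwE := PySem.List.pairwise_lt_enumerate sr 0
  have hsplit : PySem.List.enumerate sr =
      (PySem.List.enumerate sr).take k ++ ((k : Int), sr[k]) ::
        (PySem.List.enumerate sr).drop (k+1) := by
    conv_lhs => rw [← List.take_append_drop k (PySem.List.enumerate sr)]
    rw [List.drop_eq_getElem_cons hlenE, hEk]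
  have herase : (PySem.List.enumerate sr).eraseIdx k =
      (PySem.List.enumerate sr).take k ++ (PySem.List.enumerate sr).drop (k+1) :=
    List.eraseIdx_eq_take_drop_succ _ _
  apply PySem.List.sorted_eq_of_perm_of_pairwise_lt
  · -- permutation
    refine ((PySem.List.sorted_perm _ pvKfun false).append_right _).trans ?_
    refine (List.perm_append_singleton _ _).trans ?_
    unfold pvKeyed
    conv_rhs => rw [hsplit]
    rw [herase, List.map_append, List.map_append, List.map_cons]
    exact List.perm_middle.symm
  · -- strictly increasing
    rw [List.pairwise_append]
    refine ⟨pvStrict _ (List.Pairwise.sublist (List.eraseIdx_sublist _ _) hpwE),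
      List.pairwise_singleton _ _, ?_⟩
    intro a ha b hb
    rw [List.mem_singleton] at hb
    subst hb
    rw [PySem.List.mem_sorted] at ha
    rcases List.mem_map.mp ha with ⟨q, hq, rfl⟩
    have hqE : q ∈ PySem.List.enumerate sr := List.mem_of_mem_eraseIdx hq
    obtain ⟨j, hj, hqj⟩ := (PySem.List.mem_enumerate_iff _ _ _).mp hqE
    have hq1 : q.1 ≠ (k : Int) := pvEraseIdx_fst_ne sr k hk q hq
    have hjk : j ≠ k := by
      intro hcontra
      subst hcontra
      apply hq1
      rw [hqj]
      norm_num
    have := hmax j hj hjk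
    rw [hqj]
    simpa using this

def pvRelabel (k : Nat) (t : Int) : Int := if -(k : Int) < t then t else t + 1
def pvPhi (k : Nat) (x : Int × Int × Int × List Int) : Int × Int × Int × List Int :=
  (x.1, x.2.1, pvRelabel k x.2.2.1, x.2.2.2)

lemma pvKfun_phi (k : Nat) (x : Int × Int × Int × List Int) :
    pvKfun (pvPhi k x) = toLex (x.1, toLex (x.2.1, pvRelabel k x.2.2.1)) := rfl

-- re-indexing after the deletion: the keyed list of the erased input is φ of the
-- original keyed list with the selected entry removed
lemma pvKeyedErase_eq (sr : List (List Int)) (k : Nat) (hk : k < sr.length) :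
    pvKeyed (sr.eraseIdx k) =
      (((PySem.List.enumerate sr).eraseIdx k).map pvKeyEnt).map (pvPhi k) := by
  have hsr : sr = sr.take k ++ sr[k] :: sr.drop (k+1) := by
    conv_lhs => rw [← List.take_append_drop k sr]
    rw [List.drop_eq_getElem_cons hk]
  have hlt : (sr.take k).length = k := by
    rw [List.length_take]; omega
  have hE : PySem.List.enumerate sr =
      PySem.List.enumerate (sr.take k) 0 ++
        ((0 + (k : Int)), sr[k]) :: PySem.List.enumerate (sr.drop (k+1)) (0 + (k : Int) + 1) := by
    conv_lhs => rw [hsr]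
    rw [PySem.List.enumerate_append, PySem.List.enumerate_cons, hlt]
  have hlE : (PySem.List.enumerate (sr.take k) 0).length = k := by
    rw [PySem.List.length_enumerate, hlt]
  have herase : (PySem.List.enumerate sr).eraseIdx k =
      PySem.List.enumerate (sr.take k) 0 ++
        PySem.List.enumerate (sr.drop (k+1)) (0 + (k : Int) + 1) := by
    rw [List.eraseIdx_eq_take_drop_succ, hE, List.take_left' hlE,
      show (PySem.List.enumerate (sr.take k) 0 ++
          ((0 + (k : Int)), sr[k]) :: PySem.List.enumerate (sr.drop (k+1)) (0 + (k : Int) + 1)) =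
          ((PySem.List.enumerate (sr.take k) 0 ++ [((0 + (k : Int)), sr[k])]) ++
            PySem.List.enumerate (sr.drop (k+1)) (0 + (k : Int) + 1)) by simp,
      List.drop_left' (by simp [hlE])]
  -- left half: φ is the identity there (indices < k)
  have hleft : (PySem.List.enumerate (sr.take k) 0).map (fun p => pvPhi k (pvKeyEnt p)) =
      (PySem.List.enumerate (sr.take k) 0).map pvKeyEnt := by
    apply List.map_congr_left
    intro p hp
    obtain ⟨i, hi, rfl⟩ := (PySem.List.mem_enumerate_iff _ _ _).mp hp
    have hik : i < k := by
      have := hi; rw [List.length_take] at this; omega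
    show pvPhi k (pvKeyEnt (0 + (i : Int), _)) = pvKeyEnt (0 + (i : Int), _)
    simp only [pvPhi, pvKeyEnt, pvBKey, pvRelabel]
    rw [if_pos (by omega)]
  -- right half: φ turns index i+1 into index i
  have hright : (PySem.List.enumerate (sr.drop (k+1)) (0 + (k : Int) + 1)).map
        (fun p => pvPhi k (pvKeyEnt p)) =
      (PySem.List.enumerate (sr.drop (k+1)) (0 + (k : Int))).map pvKeyEnt := by
    rw [pvEnumerate_shift, List.map_map]
    apply List.map_congr_left
    intro p hp
    obtain ⟨i, hi, rfl⟩ := (PySem.List.mem_enumerate_iff _ _ _).mp hp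
    show pvPhi k (pvKeyEnt ((0 + (k:Int) + (i:Int)) + 1, _)) = pvKeyEnt (0 + (k:Int) + (i:Int), _)
    simp only [pvPhi, pvKeyEnt, pvBKey, pvRelabel]
    rw [if_neg (by omega)]
    norm_num
  -- assemble
  have hkeyed : pvKeyed (sr.eraseIdx k) =
      (PySem.List.enumerate (sr.take k) 0).map pvKeyEnt ++
        (PySem.List.enumerate (sr.drop (k+1)) (0 + (k : Int))).map pvKeyEnt := by
    unfold pvKeyed
    rw [List.eraseIdx_eq_take_drop_succ, PySem.List.enumerate_append, hlt, List.map_append]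
  rw [hkeyed, herase]
  rw [List.map_append, List.map_append, List.map_map, List.map_map,
    show (pvPhi k ∘ pvKeyEnt) = (fun p => pvPhi k (pvKeyEnt p)) from rfl, hleft, hright]

-- dropping the selected entry and re-indexing does not change the projected sorted order
lemma pvReindex (sr : List (List Int)) (k : Nat) (hk : k < sr.length) :
    (PySem.List.sorted (pvKeyed (sr.eraseIdx k)) pvKfun).map (fun k => k.2.2.2) =
      (PySem.List.sorted (((PySem.List.enumerate sr).eraseIdx k).map pvKeyEnt) pvKfun).map
        (fun k => k.2.2.2) := by
  have hstrict := pvStrict ((PySem.List.enumerate sr).eraseIdx k)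
    (List.Pairwise.sublist (List.eraseIdx_sublist _ _) (PySem.List.pairwise_lt_enumerate sr 0))
  have hsorted : PySem.List.sorted
        ((((PySem.List.enumerate sr).eraseIdx k).map pvKeyEnt).map (pvPhi k)) pvKfun =
      (PySem.List.sorted (((PySem.List.enumerate sr).eraseIdx k).map pvKeyEnt) pvKfun).map
        (pvPhi k) := by
    apply PySem.List.sorted_eq_of_perm_of_pairwise_lt
    · exact (PySem.List.sorted_perm _ pvKfun false).map _
    · rw [List.pairwise_map]
      refine List.Pairwise.imp_of_mem ?_ hstrict
      intro a b ha hb hab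
      rw [PySem.List.mem_sorted] at ha hb
      have ha3 : a.2.2.1 ≠ -(k : Int) := by
        rcases List.mem_map.mp ha with ⟨q, hq, rfl⟩
        rw [pvEnt3]
        have := pvEraseIdx_fst_ne sr k hk q hq
        omega
      have hb3 : b.2.2.1 ≠ -(k : Int) := by
        rcases List.mem_map.mp hb with ⟨q, hq, rfl⟩
        rw [pvEnt3]
        have := pvEraseIdx_fst_ne sr k hk q hq
        omega
      rw [show pvKfun a = toLex (a.1, toLex (a.2.1, a.2.2.1)) from rfl,
        show pvKfun b = toLex (b.1, toLex (b.2.1, b.2.2.1)) from rfl, pvLex_lt] at hab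
      rw [pvKfun_phi, pvKfun_phi, pvLex_lt]
      simp only [pvRelabel]
      rcases hab with h1 | ⟨h1, h2 | ⟨h2, h3⟩⟩
      · exact Or.inl h1
      · exact Or.inr ⟨h1, Or.inl h2⟩
      · refine Or.inr ⟨h1, Or.inr ⟨h2, ?_⟩⟩
        split_ifs <;> omega
  rw [pvKeyedErase_eq sr k hk, hsorted, List.map_map]
  rfl

lemma pvMain (n : Nat) (sr : List (List Int)) (h : sr.length ≤ n) :
    pvRankAux n sr = rank_stat_roll_best_top_two_alt sr := by
  induction n generalizing sr with
  | zero =>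
    have : sr = [] := List.length_eq_zero_iff.mp (by omega)
    subst this
    rfl
  | succ n ih =>
    rcases sr with _ | ⟨x, xs⟩
    · rfl
    · obtain ⟨k, hk, hobt, hmax⟩ := pv_obtain_spec (x :: xs) (by simp)
      have hstep : pvRankAux (n+1) (x :: xs) =
          pvRankAux n ((x :: xs).eraseIdx k) ++ [(x :: xs)[k]] := by
        rw [pvRankAux.eq_3 _ _ (by simp), hobt]
        simp only [PySem.List.slice_none_none]
        rw [PySem.List.pop?_natCast _ k hk]
      have hlen : ((x :: xs).eraseIdx k).length ≤ n := by
        rw [List.length_eraseIdx_of_lt hk]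
        simpa using Nat.le_of_succ_le_succ (by simpa using h)
      rw [hstep, ih _ hlen, pvAlt_eq, pvAlt_eq, pvReindex _ k hk,
        pvSorted_split _ k hk hmax, List.map_append]
      rfl

-- ===== VERDICT (by name: the statement is the Claim_ definition above) =====
theorem rank_stat_roll_best_top_two_spec : Claim_equal_rank_stat_roll_best_top_two := by
  intro sr _ _
  unfold Spec_rank_stat_roll_best_top_two rank_stat_roll_best_top_two
  exact pvMain sr.length sr le_rfl
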